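-- pv_equiv track=rewrite | github.com/sayeh1994/Medical-Corpus-Semantic-Similarity-Evaluation | EntityExtractorv2.py | check_negation
-- ===== SOURCE A (Python) =====
-- def check_negation(sentence, entity, negations):
--     tokens = sentence.split()  # Tokenize the sentence
--     try:
--         entity_index = tokens.index(entity)  # Find the index of the entity
--     except:
--         return False
--
--     for i in range(1, 4):  # Search one, two, and three words behind the entity
--         if entity_index - i >= 0 and tokens[entity_index - i] in negations:
--             return True
--
--     return False
-- ===== SOURCE B (Python) =====
-- def check_negation(sentence, entity, negations):
--     # Single forward pass keeping a sliding window of the last 3 tokens seen.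
--     window = []
--     for token in sentence.split():
--         if token == entity:
--             return any(w in negations for w in window)
--         window.append(token)
--         if len(window) > 3:
--             window.pop(0)
--     return False
-- ===== Notes on version B (the rewrite author's own statement) =====
-- stated objective: alternative
-- what changed: Replaced index-finding (.index with try/except) plus a backward indexed loop by a single forward pass that maintains a sliding window of the last 3 tokens and tests the window when the entity is first seen.
import Mathlib
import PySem

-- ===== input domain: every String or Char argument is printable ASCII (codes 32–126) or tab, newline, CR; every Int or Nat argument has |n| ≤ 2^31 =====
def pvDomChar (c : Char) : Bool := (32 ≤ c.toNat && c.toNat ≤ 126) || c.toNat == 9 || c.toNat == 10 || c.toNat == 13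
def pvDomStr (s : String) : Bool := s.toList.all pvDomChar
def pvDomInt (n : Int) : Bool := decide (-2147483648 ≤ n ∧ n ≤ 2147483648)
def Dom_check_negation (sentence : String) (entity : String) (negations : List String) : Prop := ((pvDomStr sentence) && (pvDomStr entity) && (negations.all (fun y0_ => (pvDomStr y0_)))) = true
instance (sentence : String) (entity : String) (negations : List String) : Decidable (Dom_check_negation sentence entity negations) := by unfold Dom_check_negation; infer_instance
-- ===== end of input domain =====

-- B replaces index-finding plus a backward indexed loop by one forward pass with a
-- sliding window of the last 3 tokens (alternative decomposition, same cost).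

-- ===== PORT A =====
def check_negation (sentence : String) (entity : String) (negations : List String) : Bool :=
  let tokens := PySem.Str.split₀ sentence
  match PySem.List.index? tokens entity with
  | none => false          -- bare except around .index: ValueError → return False
  | some entity_index =>
    -- for i in range(1, 4): if entity_index - i >= 0 and tokens[entity_index - i] in negations: return True
    (PySem.List.pyRange 1 4 1).any (fun i =>
      decide ((entity_index : Int) - i ≥ 0) &&
      ((PySem.List.pyGet? tokens ((entity_index : Int) - i)).elim false negations.contains))

-- ===== PORT B =====
-- forward pass; window holds the last ≤ 3 tokens seen before the current one
def checkNegGo (entity : String) (negations : List String) (window : List String) : List String → Bool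
  | [] => false
  | t :: ts =>
    if t = entity then window.any negations.contains
    else
      checkNegGo entity negations
        (if (window ++ [t]).length > 3 then (window ++ [t]).drop 1 else window ++ [t]) ts

def check_negation_alt (sentence : String) (entity : String) (negations : List String) : Bool :=
  checkNegGo entity negations [] (PySem.Str.split₀ sentence)

-- ===== PRECONDITION & SPEC =====
def Spec_check_negation (sentence : String) (entity : String) (negations : List String) (out : Bool) : Prop := out = check_negation_alt sentence entity negations
instance (sentence : String) (entity : String) (negations : List String) (out : Bool) : Decidable (Spec_check_negation sentence entity negations out) := by unfold Spec_check_negation; infer_instance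

-- ===== CLAIM (what is proved, stated in full; the proofs are below) =====
def Claim_equal_check_negation : Prop := ∀ (sentence : String) (entity : String) (negations : List String), Dom_check_negation sentence entity negations → Spec_check_negation sentence entity negations (check_negation sentence entity negations)

-- ===== LEMMAS AND PROOFS =====

-- the last min(3, length) elements of a list
def last3 {α : Type} (l : List α) : List α := l.drop (l.length - 3)

theorem last3_eq_self {α : Type} {l : List α} (h : l.length ≤ 3) : last3 l = l := by
  simp [last3, Nat.sub_eq_zero_of_le h]

theorem last3_cons {α : Type} (a : α) {l : List α} (h : 3 ≤ l.length) :
    last3 (a :: l) = last3 l := by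
  simp only [last3, List.length_cons]
  rw [show l.length + 1 - 3 = (l.length - 3) + 1 by omega, List.drop_succ_cons]

theorem last3_last3_append {α : Type} (x y : List α) :
    last3 (last3 x ++ y) = last3 (x ++ y) := by
  induction x with
  | nil => simp [last3]
  | cons a t ih =>
    by_cases h : 3 ≤ t.length
    · rw [last3_cons a h, ih, List.cons_append, last3_cons a (by simp; omega)]
    · rw [last3_eq_self (l := a :: t) (by simp; omega)]

theorem checkNegGo_not_mem (e : String) (n : List String) :
    ∀ (ts w : List String), e ∉ ts → checkNegGo e n w ts = false := by
  intro ts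
  induction ts with
  | nil => intro w _; simp [checkNegGo]
  | cons t ts ih =>
    intro w h
    simp only [List.mem_cons, not_or] at h
    rw [checkNegGo, if_neg (fun hc : t = e => h.1 hc.symm)]
    exact ih _ h.2

theorem checkNegGo_found (e : String) (n : List String) :
    ∀ (pre w suf : List String), e ∉ pre → w.length ≤ 3 →
    checkNegGo e n w (pre ++ e :: suf) = (last3 (w ++ pre)).any n.contains := by
  intro pre
  induction pre with
  | nil =>
    intro w suf _ hw
    simp [checkNegGo, last3_eq_self hw]
  | cons p pre ih =>
    intro w suf he hw
    simp only [List.mem_cons, not_or] at he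
    simp only [List.cons_append]
    rw [checkNegGo, if_neg (fun hc : p = e => he.1 hc.symm)]
    have hset : (if (w ++ [p]).length > 3 then (w ++ [p]).drop 1 else w ++ [p])
        = last3 (w ++ [p]) := by
      by_cases h : (w ++ [p]).length > 3
      · rw [if_pos h]
        have hw3 : (w ++ [p]).length - 3 = 1 := by simp at h ⊢; omega
        rw [last3, hw3]
      · rw [if_neg h, last3_eq_self (l := w ++ [p]) (by omega)]
    rw [hset, ih _ suf he.2 (by simp [last3]; omega), last3_last3_append (w ++ [p]) pre]
    simp

-- a list of length ≥ 3 ends in three elements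
theorem exists_last_three {α : Type} (l : List α) (h : 3 ≤ l.length) :
    ∃ (q : List α) (x y z : α), l = q ++ [x, y, z] := by
  match hr : l.reverse with
  | [] =>
    have h0 : l.length = 0 := by simpa using congrArg List.length hr
    exact absurd h (by omega)
  | [a] =>
    have h0 : l.length = 1 := by simpa using congrArg List.length hr
    exact absurd h (by omega)
  | [a, b] =>
    have h0 : l.length = 2 := by simpa using congrArg List.length hr
    exact absurd h (by omega)
  | a :: b :: c :: t =>
    refine ⟨t.reverse, c, b, a, ?_⟩
    have hl : l = l.reverse.reverse := by simp
    rw [hl, hr]; simp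

-- A's backward three-index scan computes 'some of the last ≤3 tokens before the entity is a negation'
theorem A_loop_eq (negations : List String) (pre suf : List String) (e : String) :
    ((PySem.List.pyRange 1 4 1).any fun i =>
      decide ((pre.length : Int) - i ≥ 0) &&
      ((PySem.List.pyGet? (pre ++ e :: suf) ((pre.length : Int) - i)).elim false negations.contains))
    = (last3 pre).any negations.contains := by
  have hr : PySem.List.pyRange 1 4 1 = [1, 2, 3] := by decide
  rw [hr]
  match pre with
  | [] => simp [last3]
  | [a] =>
    simp only [List.any_cons, List.any_nil]
    rw [last3_eq_self (by simp)]
    norm_num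
  | [a, b] =>
    simp only [List.any_cons, List.any_nil]
    rw [last3_eq_self (by simp)]
    norm_num
    rw [show PySem.List.pyGet? (a :: b :: e :: suf) (1 : Int) = some b from by
          norm_num [PySem.List.pyGet?, PySem.List.pyIdx?]
          rw [if_pos (by positivity)]
          rfl]
    simp [Bool.or_comm]
  | a :: b :: c :: rest =>
    obtain ⟨q, x, y, z, hq⟩ := exists_last_three (a :: b :: c :: rest) (by simp)
    rw [hq]
    have hlast : last3 (q ++ [x, y, z]) = [x, y, z] := by simp [last3]
    have hlen : ((q ++ [x, y, z]).length : Int) = (q.length : Int) + 3 := by simp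
    simp only [List.any_cons, List.any_nil, hlen, List.append_assoc]
    rw [show (q.length : Int) + 3 - 1 = (q.length : Int) + 2 from by ring,
        show (q.length : Int) + 3 - 2 = (q.length : Int) + 1 from by ring,
        show (q.length : Int) + 3 - 3 = (q.length : Int) from by ring]
    have g1 : PySem.List.pyGet? (q ++ ([x, y, z] ++ e :: suf)) ((q.length : Int)) = some x := by
      have h := PySem.List.pyGet?_of_nonneg (xs := q ++ ([x, y, z] ++ e :: suf))
        (i := ((q.length : Int))) (by positivity)
      rw [h, show ((q.length : Int)).toNat = q.length by omega,
          List.getElem?_append_right (by omega), show q.length - q.length = 0 by omega]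
      rfl
    have g2 : PySem.List.pyGet? (q ++ ([x, y, z] ++ e :: suf)) ((q.length : Int) + 1) = some y := by
      have h := PySem.List.pyGet?_of_nonneg (xs := q ++ ([x, y, z] ++ e :: suf))
        (i := ((q.length : Int) + 1)) (by positivity)
      rw [h, show ((q.length : Int) + 1).toNat = q.length + 1 by omega,
          List.getElem?_append_right (by omega), show q.length + 1 - q.length = 1 by omega]
      rfl
    have g3 : PySem.List.pyGet? (q ++ ([x, y, z] ++ e :: suf)) ((q.length : Int) + 2) = some z := by
      have h := PySem.List.pyGet?_of_nonneg (xs := q ++ ([x, y, z] ++ e :: suf))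
        (i := ((q.length : Int) + 2)) (by positivity)
      rw [h, show ((q.length : Int) + 2).toNat = q.length + 2 by omega,
          List.getElem?_append_right (by omega), show q.length + 2 - q.length = 2 by omega]
      rfl
    rw [g1, g2, g3, hlast,
        show (decide ((q.length : Int) + 2 ≥ 0)) = true from decide_eq_true (by positivity),
        show (decide ((q.length : Int) + 1 ≥ 0)) = true from decide_eq_true (by positivity),
        show (decide ((q.length : Int) ≥ 0)) = true from decide_eq_true (by positivity)]
    simp only [List.any_cons, List.any_nil, Option.elim, Bool.true_and, Bool.or_false]
    simp [Bool.or_comm, Bool.or_assoc]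

-- ===== VERDICT (by name: the statement is the Claim_ definition above) =====
theorem check_negation_spec : Claim_equal_check_negation := by
  intro sentence entity negations _
  unfold Spec_check_negation check_negation check_negation_alt
  cases hidx : PySem.List.index? (PySem.Str.split₀ sentence) entity with
  | none =>
    simp only [hidx]
    rw [PySem.List.index?_eq_none_iff] at hidx
    rw [checkNegGo_not_mem _ _ _ _ hidx]
  | some k =>
    simp only [hidx]
    rw [PySem.List.index?_eq_some_iff] at hidx
    obtain ⟨pre, suf, htok, hlen, hnm⟩ := hidx
    rw [htok, ← hlen, A_loop_eq,
        checkNegGo_found entity negations pre [] suf hnm (by simp)]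
    simp
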